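-- pv_equiv track=rewrite | github.com/BigPolarBear1/factorization_v3 | QSv3_010.py | find_solution_x
-- ===== SOURCE A (Python) =====
-- def equation(y,x,n,mod):
--     rem=(x**2)+y*-x+n
--     rem2=rem%mod
--     return rem2,rem
--
-- def find_solution_x(n,mod,y):
--     ##to do: can use tonelli if this ends up taking too long
--     rlist=[]
--     x=0
--     while x<mod:
--         test,test2=equation(y,x,n,mod)
--         if test == 0:
--             rlist.append([y,x])
--         x+=1
--     return rlist
-- ===== SOURCE B (Python) =====
-- def find_solution_x(n, mod, y):
--     # Strength-reduced single pass: maintain r = f(x) (mod mod) and the first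
--     # difference d = f(x+1)-f(x) = 2x+1-y, so no multiplication per iteration.
--     rlist = []
--     r, d = n, 1 - y
--     for x in range(mod):
--         r %= mod
--         if r == 0:
--             rlist.append([y, x])
--         r += d
--         d += 2
--     return rlist
-- ===== Notes on version B (the rewrite author's own statement) =====
-- stated objective: faster
-- what changed: Replaces re-evaluating the quadratic x^2-y*x+n from scratch at every x with a strength-reduced single pass that maintains the residue and its first difference (r += d; d += 2), eliminating all multiplications from the loop.
import Mathlib
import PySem

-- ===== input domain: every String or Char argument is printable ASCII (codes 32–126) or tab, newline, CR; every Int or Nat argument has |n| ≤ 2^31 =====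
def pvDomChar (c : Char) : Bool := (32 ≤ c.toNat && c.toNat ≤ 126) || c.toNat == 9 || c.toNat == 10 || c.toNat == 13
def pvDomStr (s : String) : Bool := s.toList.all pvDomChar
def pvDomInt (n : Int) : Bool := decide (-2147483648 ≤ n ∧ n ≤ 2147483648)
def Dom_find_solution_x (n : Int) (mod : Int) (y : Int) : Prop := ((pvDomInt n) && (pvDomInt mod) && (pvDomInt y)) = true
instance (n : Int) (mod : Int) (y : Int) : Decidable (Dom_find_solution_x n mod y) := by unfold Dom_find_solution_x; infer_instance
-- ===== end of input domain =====

-- B strength-reduces A's per-iteration quadratic evaluation to two additions (same O(mod) pass, measurably faster by a constant factor).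

-- ===== PORT A =====
-- helper 'equation' of A (returns (rem % mod, rem)); mod is only applied with mod > 0 (the loop body runs only then)
def pvEquation (y x n m : Int) : Int × Int :=
  let rem := x ^ 2 + y * (-x) + n
  (PySem.Int.mod rem m, rem)

-- 'x = 0; while x < mod: …; x += 1' = a pass over range(0, mod)
def find_solution_x (n : Int) (mod : Int) (y : Int) : List (List Int) :=
  (PySem.List.pyRange 0 mod 1).foldl
    (fun rlist x =>
      let t := pvEquation y x n mod
      if t.1 = 0 then rlist ++ [[y, x]] else rlist)
    []

-- ===== PORT B =====
def find_solution_x_alt (n : Int) (mod : Int) (y : Int) : List (List Int) :=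
  (((PySem.List.pyRange 0 mod 1).foldl
    (fun (st : List (List Int) × Int × Int) x =>
      let r := PySem.Int.mod st.2.1 mod
      let rlist := if r = 0 then st.1 ++ [[y, x]] else st.1
      (rlist, r + st.2.2, st.2.2 + 2))
    ([], n, 1 - y))).1

-- ===== PRECONDITION & SPEC =====
def Spec_find_solution_x (n : Int) (mod : Int) (y : Int) (out : List (List Int)) : Prop := out = find_solution_x_alt n mod y
instance (n : Int) (mod : Int) (y : Int) (out : List (List Int)) : Decidable (Spec_find_solution_x n mod y out) := by unfold Spec_find_solution_x; infer_instance

-- ===== CLAIM (what is proved, stated in full; the proofs are below) =====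
def Claim_equal_find_solution_x : Prop := ∀ (n : Int) (mod : Int) (y : Int), Dom_find_solution_x n mod y → Spec_find_solution_x n mod y (find_solution_x n mod y)

-- ===== LEMMAS AND PROOFS =====

-- joint loop invariant: after k steps B's accumulator equals A's, B's d equals 2k+1-y,
-- and B's running value r is congruent to the quadratic at k
theorem pv_inv (n mod y : Int) (hm : 0 < mod) (k : ℕ) :
    ∃ r : Int,
      ((List.range k).map (fun j : Nat => (0 : Int) + (j : Int))).foldl
        (fun (st : List (List Int) × Int × Int) x =>
          let r := PySem.Int.mod st.2.1 mod
          let rlist := if r = 0 then st.1 ++ [[y, x]] else st.1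
          (rlist, r + st.2.2, st.2.2 + 2))
        ([], n, 1 - y)
      = (((List.range k).map (fun j : Nat => (0 : Int) + (j : Int))).foldl
          (fun rlist x =>
            let t := pvEquation y x n mod
            if t.1 = 0 then rlist ++ [[y, x]] else rlist)
          [], r, 2 * k + 1 - y)
      ∧ r % mod = ((k : Int) ^ 2 + y * (-(k : Int)) + n) % mod := by
  induction k with
  | zero =>
      refine ⟨n, ?_, ?_⟩
      · simp
      · norm_num
  | succ k ih =>
      obtain ⟨r, hfold, hr⟩ := ih
      refine ⟨(r % mod) + (2 * k + 1 - y), ?_, ?_⟩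
      · rw [List.range_succ, List.map_append, List.foldl_append, List.foldl_append, hfold]
        simp only [List.map_cons, List.map_nil, List.foldl_cons, List.foldl_nil,
          pvEquation, PySem.Int.mod_eq_emod_of_pos hm]
        have hcond : ((0 : Int) + (k : Int)) ^ 2 + y * (-((0 : Int) + (k : Int))) + n
            = (k : Int) ^ 2 + y * (-(k : Int)) + n := by ring
        rw [hcond, ← hr]
        simp only [Prod.mk.injEq]
        refine ⟨trivial, trivial, by push_cast; ring⟩
      · have : ((r % mod) + (2 * (k : Int) + 1 - y)) % mod
            = (r + (2 * (k : Int) + 1 - y)) % mod := by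
          conv_lhs => rw [Int.add_emod, Int.emod_emod_of_dvd _ dvd_rfl, ← Int.add_emod]
        rw [this, Int.add_emod, hr, ← Int.add_emod]
        have : ((k : Int) ^ 2 + y * (-(k : Int)) + n) + (2 * (k : Int) + 1 - y)
            = ((k : Int) + 1) ^ 2 + y * (-((k : Int) + 1)) + n := by ring
        rw [this]
        push_cast
        ring_nf

-- ===== VERDICT (by name: the statement is the Claim_ definition above) =====
theorem find_solution_x_spec : Claim_equal_find_solution_x := by
  intro n mod y _
  unfold Spec_find_solution_x find_solution_x find_solution_x_alt
  by_cases hm : 0 < mod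
  · rw [PySem.List.pyRange_one]
    obtain ⟨r, hfold, _⟩ := pv_inv n mod y hm (mod - 0).toNat
    rw [hfold]
  · rw [PySem.List.pyRange_one_eq_nil (by omega)]
    simp
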